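-- pv_equiv track=rewrite | github.com/12944qwerty/AdventOfCode | 2021/day10/solution.py | part1
-- ===== SOURCE A (Python) =====
-- close = {
--     ")": 3,
--     "]": 57,
--     "}": 1197,
--     ">": 25137,
-- }
--
-- def part1(data):
--     total = 0
--
--     for line in data:
--         prev = ""
--         while prev != line:
--             prev = line
--             line = line.replace("()", "").replace("[]", "").replace("{}", "").replace("<>", "")
--
--         for i in line:
--             if i in close:
--                 total += close[i]
--                 break
--
--     return total
-- ===== SOURCE B (Python) =====
-- close = {")": 3, "]": 57, "}": 1197, ">": 25137}
-- pair = {")": "(", "]": "[", "}": "{", ">": "<"}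
--
-- def part1(data):
--     total = 0
--     for line in data:
--         stack = []
--         for c in line:
--             if c in close:
--                 if stack and stack[-1] == pair[c]:
--                     stack.pop()
--                 else:
--                     total += close[c]
--                     break
--             else:
--                 stack.append(c)
--     return total
-- ===== Notes on version B (the rewrite author's own statement) =====
-- stated objective: alternative
-- what changed: A repeatedly rescans each line with four chained str.replace calls until a fixpoint before looking for the first illegal closer; B makes a single left-to-right stack pass per line, scoring the first closing bracket that does not match the stack top.
import Mathlib
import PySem

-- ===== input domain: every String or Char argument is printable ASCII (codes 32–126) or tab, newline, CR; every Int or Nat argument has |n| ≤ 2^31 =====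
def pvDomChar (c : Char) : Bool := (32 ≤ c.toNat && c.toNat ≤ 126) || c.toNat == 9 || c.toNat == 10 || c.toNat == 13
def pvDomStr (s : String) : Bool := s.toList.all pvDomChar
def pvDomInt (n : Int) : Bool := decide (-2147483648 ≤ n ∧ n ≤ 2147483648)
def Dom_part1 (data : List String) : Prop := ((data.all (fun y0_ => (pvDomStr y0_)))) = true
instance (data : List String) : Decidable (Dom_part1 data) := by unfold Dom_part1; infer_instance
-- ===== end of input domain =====

-- B replaces A's replace-until-fixpoint pair elimination by a single left-to-right stack
-- pass per line (objective: alternative algorithm; not measurably faster on random inputs).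

-- ===== PORT A =====
-- the module-level dict `close`
def closeA : PySem.Dict Char Int :=
  PySem.Dict.ofList [(')', 3), (']', 57), ('}', 1197), ('>', 25137)]

-- one iteration of the while-loop body: the four chained .replace calls
def pyStepA (line : String) : String :=
  PySem.Str.replace (PySem.Str.replace (PySem.Str.replace
    (PySem.Str.replace line "()" "") "[]" "") "{}" "") "<>" ""

-- `remPair o c l` = what Python's l.replace(o+c, "") computes (left-to-right removal);
-- defined here only to justify termination of the while loop below.
def remPair (o c : Char) : List Char → List Char
  | x :: y :: t => if x = o ∧ y = c then remPair o c t else x :: remPair o c (y :: t)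
  | l => l

lemma replace_go_eq (o c : Char) : ∀ (fuel : Nat) (l acc : List Char), l.length ≤ fuel →
    PySem.Chars.replace.go [o, c] [] fuel l acc = acc.reverse ++ remPair o c l := by
  intro fuel
  induction fuel with
  | zero =>
    intro l acc h
    have : l = [] := List.eq_nil_of_length_eq_zero (by omega)
    subst this
    simp [PySem.Chars.replace.go, remPair]
  | succ n ih =>
    intro l acc h
    match l with
    | [] => simp [PySem.Chars.replace.go, remPair]
    | [x] =>
      rw [PySem.Chars.replace.go]
      have hpre : [o, c].isPrefixOf [x] = false := by simp [List.isPrefixOf]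
      rw [hpre]
      simp only [Bool.false_eq_true, if_false]
      rw [ih [] (x :: acc) (by simp)]
      simp [remPair]
    | x :: y :: t =>
      rw [PySem.Chars.replace.go]
      by_cases hxy : x = o ∧ y = c
      · have hpre : [o, c].isPrefixOf (x :: y :: t) = true := by
          simp [List.isPrefixOf, hxy.1, hxy.2]
        rw [hpre]
        simp only [if_true]
        rw [show List.drop [o,c].length (x :: y :: t) = t from rfl]
        rw [ih t _ (by simp at h ⊢; omega)]
        simp [remPair, hxy]
      · have hpre : [o, c].isPrefixOf (x :: y :: t) = false := by
          simp [List.isPrefixOf]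
          intro h1 h2; exact absurd ⟨h1.symm, h2.symm⟩ hxy
        rw [hpre]
        simp only [Bool.false_eq_true, if_false]
        rw [ih (y :: t) (x :: acc) (by simp at h ⊢; omega)]
        simp [remPair, hxy]

lemma replace_eq_remPair (o c : Char) (l : List Char) :
    PySem.Chars.replace l [o, c] [] = remPair o c l := by
  rw [PySem.Chars.replace]
  rw [if_neg (by simp)]
  exact replace_go_eq o c l.length l [] le_rfl

lemma remPair_length_le (o c : Char) (l : List Char) : (remPair o c l).length ≤ l.length := by
  fun_induction remPair o c l <;> simp_all
  omega

lemma remPair_eq_of_length (o c : Char) (l : List Char)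
    (h : (remPair o c l).length = l.length) : remPair o c l = l := by
  fun_induction remPair o c l with
  | case1 x y t hxy ih =>
    exfalso; have := remPair_length_le o c t; simp_all
  | case2 x y t hxy ih => simp_all
  | case3 l hl => rfl

lemma stepA_toList (line : String) : (pyStepA line).toList =
    remPair '<' '>' (remPair '{' '}' (remPair '[' ']' (remPair '(' ')' line.toList))) := by
  simp only [pyStepA, PySem.Str.toList_replace]
  rw [show ("()" : String).toList = ['(', ')'] from rfl,
      show ("[]" : String).toList = ['[', ']'] from rfl,
      show ("{}" : String).toList = ['{', '}'] from rfl,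
      show ("<>" : String).toList = ['<', '>'] from rfl,
      show ("" : String).toList = [] from rfl]
  rw [replace_eq_remPair, replace_eq_remPair, replace_eq_remPair, replace_eq_remPair]

lemma stepA_len_lt (line : String) (h : pyStepA line ≠ line) :
    (pyStepA line).toList.length < line.toList.length := by
  by_contra hlen
  push Not at hlen
  apply h
  have e := stepA_toList line
  set l0 := line.toList with hl0
  have h1 := remPair_length_le '(' ')' l0
  have h2 := remPair_length_le '[' ']' (remPair '(' ')' l0)
  have h3 := remPair_length_le '{' '}' (remPair '[' ']' (remPair '(' ')' l0))
  have h4 := remPair_length_le '<' '>' (remPair '{' '}' (remPair '[' ']' (remPair '(' ')' l0)))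
  rw [e] at hlen
  have e1 : remPair '(' ')' l0 = l0 := remPair_eq_of_length _ _ _ (by omega)
  rw [e1] at e h2 h3 h4 hlen
  have e2 : remPair '[' ']' l0 = l0 := remPair_eq_of_length _ _ _ (by omega)
  rw [e2] at e h3 h4 hlen
  have e3 : remPair '{' '}' l0 = l0 := remPair_eq_of_length _ _ _ (by omega)
  rw [e3] at e h4 hlen
  have e4 : remPair '<' '>' l0 = l0 := remPair_eq_of_length _ _ _ (by omega)
  rw [e4] at e
  exact String.toList_inj.mp e

-- the `while prev != line:` loop: iterate pyStepA to its fixpoint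
def reduceA (line : String) : String :=
  if pyStepA line = line then line else reduceA (pyStepA line)
termination_by line.toList.length
decreasing_by exact stepA_len_lt line (by assumption)

-- the `for i in line: if i in close: total += close[i]; break` loop
def scanA (total : Int) : List Char → Int
  | [] => total
  | c :: t =>
    match closeA.get? c with
    | some v => total + v
    | none => scanA total t

def part1 (data : List String) : Int :=
  data.foldl (fun total line => scanA total (reduceA line).toList) 0

-- ===== PORT B =====
def closeB : PySem.Dict Char Int :=
  PySem.Dict.ofList [(')', 3), (']', 57), ('}', 1197), ('>', 25137)]

def pairB : PySem.Dict Char Char :=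
  PySem.Dict.ofList [(')', '('), (']', '['), ('}', '{'), ('>', '<')]

-- B's inner loop: stack pass, returning the score of the first corrupt closer (0 if none)
def lineB (stack : List Char) : List Char → Int
  | [] => 0
  | c :: t =>
    match closeB.get? c with
    | some v =>
      if stack ≠ [] ∧ stack.getLast? = pairB.get? c then lineB stack.dropLast t else v
    | none => lineB (stack ++ [c]) t

def part1_alt (data : List String) : Int :=
  data.foldl (fun total line => total + lineB [] line.toList) 0

-- ===== PRECONDITION & SPEC =====
def Spec_part1 (data : List String) (out : Int) : Prop := out = part1_alt data
instance (data : List String) (out : Int) : Decidable (Spec_part1 data out) := by unfold Spec_part1; infer_instance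

-- ===== CLAIM (what is proved, stated in full; the proofs are below) =====
def Claim_equal_part1 : Prop := ∀ (data : List String), Dom_part1 data → Spec_part1 data (part1 data)

-- ===== LEMMAS AND PROOFS =====

-- abstract single stack step (shared characterisation of both programs)
def isCloser (c : Char) : Bool := c == ')' || c == ']' || c == '}' || c == '>'

def pairOf (c : Char) : Char :=
  if c = ')' then '(' else if c = ']' then '[' else if c = '}' then '{' else '<'

def closeVal (c : Char) : Int :=
  if c = ')' then 3 else if c = ']' then 57 else if c = '}' then 1197 else 25137

def step (st : List Char) (c : Char) : List Char :=
  if isCloser c = true ∧ st.getLast? = some (pairOf c) then st.dropLast else st ++ [c]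

def fsc : List Char → Int
  | [] => 0
  | c :: t => if isCloser c then closeVal c else fsc t

-- — dict characterisations —
lemma closeA_get (c : Char) :
    closeA.get? c = if isCloser c then some (closeVal c) else none := by
  by_cases h1 : c = ')'
  · subst h1; decide
  by_cases h2 : c = ']'
  · subst h2; decide
  by_cases h3 : c = '}'
  · subst h3; decide
  by_cases h4 : c = '>'
  · subst h4; decide
  have hc : isCloser c = false := by
    simp [isCloser, h1, h2, h3, h4]
  rw [hc]
  simp only [Bool.false_eq_true, if_false]
  have e : closeA = PySem.Dict.mk [(')', 3), (']', 57), ('}', 1197), ('>', 25137)] := by rfl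
  rw [e]
  simp [Ne.symm h1, Ne.symm h2, Ne.symm h3, Ne.symm h4, PySem.Dict.get?]

lemma closeB_get (c : Char) :
    closeB.get? c = if isCloser c then some (closeVal c) else none := by
  by_cases h1 : c = ')'
  · subst h1; decide
  by_cases h2 : c = ']'
  · subst h2; decide
  by_cases h3 : c = '}'
  · subst h3; decide
  by_cases h4 : c = '>'
  · subst h4; decide
  have hc : isCloser c = false := by simp [isCloser, h1, h2, h3, h4]
  rw [hc]
  simp only [Bool.false_eq_true, if_false]
  have e : closeB = PySem.Dict.mk [(')', 3), (']', 57), ('}', 1197), ('>', 25137)] := by rfl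
  rw [e]
  simp [Ne.symm h1, Ne.symm h2, Ne.symm h3, Ne.symm h4, PySem.Dict.get?]

lemma pairB_get (c : Char) :
    pairB.get? c = if isCloser c then some (pairOf c) else none := by
  by_cases h1 : c = ')'
  · subst h1; decide
  by_cases h2 : c = ']'
  · subst h2; decide
  by_cases h3 : c = '}'
  · subst h3; decide
  by_cases h4 : c = '>'
  · subst h4; decide
  have hc : isCloser c = false := by simp [isCloser, h1, h2, h3, h4]
  rw [hc]
  simp only [Bool.false_eq_true, if_false]
  have e : pairB = PySem.Dict.mk [(')', '('), (']', '['), ('}', '{'), ('>', '<')] := by rfl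
  rw [e]
  simp [Ne.symm h1, Ne.symm h2, Ne.symm h3, Ne.symm h4, PySem.Dict.get?]

lemma closer_cases (c : Char) (h : isCloser c = true) :
    c = ')' ∨ c = ']' ∨ c = '}' ∨ c = '>' := by
  have := h; simp [isCloser] at this; tauto

lemma isCloser_pairOf (c : Char) (h : isCloser c = true) : isCloser (pairOf c) = false := by
  rcases closer_cases c h with rfl | rfl | rfl | rfl <;> decide

lemma pair_mem (c : Char) (h : isCloser c = true) :
    (pairOf c, c) ∈ [('(', ')'), ('[', ']'), ('{', '}'), ('<', '>')] := by
  rcases closer_cases c h with rfl | rfl | rfl | rfl <;> decide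

-- — step facts —
lemma step_push (st : List Char) (c : Char) (h : ¬ (isCloser c = true ∧ st.getLast? = some (pairOf c))) :
    step st c = st ++ [c] := by
  simp [step, h]

lemma step_pop (st : List Char) (c : Char) (h : isCloser c = true) (h2 : st.getLast? = some (pairOf c)) :
    step st c = st.dropLast := by
  simp [step, h, h2]

-- removing one leftmost-removal pass does not change the stack fold
lemma foldl_step_remPair (o c : Char) (ho : isCloser o = false) (hc : isCloser c = true)
    (hp : pairOf c = o) :
    ∀ l st, List.foldl step st (remPair o c l) = List.foldl step st l := by
  intro l
  fun_induction remPair o c l with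
  | case1 x y t hxy ih =>
    intro st
    rw [ih st]
    simp only [List.foldl_cons]
    have e1 : step st x = st ++ [x] :=
      step_push st x (fun hh => by rw [hxy.1] at hh; simp [ho] at hh)
    have e2 : step (st ++ [x]) y = st := by
      rw [hxy.2]
      rw [step_pop (st ++ [x]) c hc (by simp [hp, hxy.1])]
      simp
    rw [e1, e2]
  | case2 x y t hxy ih =>
    intro st
    simp only [List.foldl_cons]
    rw [ih]
    simp only [List.foldl_cons]
  | case3 l hl => intro st; rfl

-- a remPair fixpoint has no adjacent (o, c) pair
lemma remPair_id_no_occ (o c : Char) (l : List Char) (h : remPair o c l = l) :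
    ∀ u v, l ≠ u ++ o :: c :: v := by
  fun_induction remPair o c l with
  | case1 x y t hxy ih =>
    exfalso
    have := remPair_length_le o c t
    have : (remPair o c t).length = (x :: y :: t).length := by rw [h]
    simp at this; omega
  | case2 x y t hxy ih =>
    have ht : remPair o c (y :: t) = y :: t := by
      injection h
    intro u v hu
    match u with
    | [] =>
      simp at hu
      exact hxy ⟨hu.1, hu.2.1⟩
    | w :: u' =>
      simp at hu
      exact ih ht u' v hu.2
  | case3 l hl =>
    intro u v hu
    match u, hu with
    | [], hu => exact hl o c v hu
    | [w], hu => exact hl w o (c :: v) (by simpa using hu)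
    | w :: x :: u', hu => exact hl w x (u' ++ o :: c :: v) (by simpa using hu)

-- a string with no adjacent matched pair is a fixpoint of the stack fold
lemma red_of_noRedex (l : List Char)
    (h : ∀ (o c : Char), (o, c) ∈ [('(', ')'), ('[', ']'), ('{', '}'), ('<', '>')] →
      ∀ u v, l ≠ u ++ o :: c :: v) :
    List.foldl step [] l = l := by
  induction l using List.reverseRecOn with
  | nil => rfl
  | append_singleton l c ih =>
    rw [List.foldl_append]
    rw [ih (by
      intro o c' hm u v hu
      exact h o c' hm u (v ++ [c]) (by rw [hu]; simp))]
    simp only [List.foldl_cons, List.foldl_nil]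
    rw [step_push]
    intro ⟨hc, hlast⟩
    have hl : l = l.dropLast ++ [pairOf c] := by
      obtain ⟨l', rfl⟩ := List.getLast?_eq_some_iff.mp hlast
      simp
    exact h (pairOf c) c (pair_mem c hc) l.dropLast [] (by rw [hl]; simp)

-- a closer already on the stack stays there
lemma stack_persist (c : Char) (hc : isCloser c = true) :
    ∀ (cs : List Char) (st r : List Char),
      ∃ r', List.foldl step (st ++ c :: r) cs = st ++ c :: r' := by
  intro cs
  induction cs with
  | nil => intro st r; exact ⟨r, rfl⟩
  | cons a t ih =>
    intro st r
    simp only [List.foldl_cons]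
    by_cases hpop : isCloser a = true ∧ (st ++ c :: r).getLast? = some (pairOf a)
    · rw [step_pop _ _ hpop.1 hpop.2]
      match r with
      | [] =>
        exfalso
        have : (st ++ [c]).getLast? = some c := by simp
        rw [this] at hpop
        have := isCloser_pairOf a hpop.1
        have hcc : c = pairOf a := by injection hpop.2
        rw [← hcc] at this
        simp [hc] at this
      | b :: r' =>
        have : (st ++ c :: b :: r').dropLast = st ++ c :: (b :: r').dropLast := by
          rw [show st ++ c :: b :: r' = (st ++ [c]) ++ b :: r' by simp,
              List.dropLast_append_of_ne_nil]
          · simp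
          · simp
        rw [this]
        exact ih st _
    · rw [step_push _ _ hpop]
      have : st ++ c :: r ++ [a] = st ++ c :: (r ++ [a]) := by simp
      rw [this]
      exact ih st _

-- — fsc facts —
lemma fsc_noCloser (st : List Char) (h : ∀ x ∈ st, isCloser x = false) : fsc st = 0 := by
  induction st with
  | nil => rfl
  | cons a t ih =>
    have := h a (by simp)
    simp [fsc, this]
    exact ih (fun x hx => h x (by simp [hx]))

lemma fsc_append_closer (st : List Char) (c : Char) (r : List Char)
    (h : ∀ x ∈ st, isCloser x = false) (hc : isCloser c = true) :
    fsc (st ++ c :: r) = closeVal c := by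
  induction st with
  | nil => simp [fsc, hc]
  | cons a t ih =>
    have := h a (by simp)
    simp only [List.cons_append, fsc, this]
    simp only [Bool.false_eq_true, if_false]
    exact ih (fun x hx => h x (by simp [hx]))

-- — B computes the score of the first closer left on the abstract stack —
lemma lineB_eq_fsc : ∀ (cs st : List Char), (∀ x ∈ st, isCloser x = false) →
    lineB st cs = fsc (List.foldl step st cs) := by
  intro cs
  induction cs with
  | nil => intro st h; simp [lineB, List.foldl_nil, fsc_noCloser st h]
  | cons c t ih =>
    intro st h
    rw [lineB]
    rw [closeB_get c]
    by_cases hc : isCloser c = true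
    · rw [if_pos hc]
      simp only
      by_cases hbr : st ≠ [] ∧ st.getLast? = pairB.get? c
      · rw [if_pos hbr]
        have hlast : st.getLast? = some (pairOf c) := by
          rw [hbr.2, pairB_get c, if_pos hc]
        simp only [List.foldl_cons]
        rw [step_pop st c hc hlast]
        exact ih st.dropLast (fun x hx => h x (List.dropLast_sublist st |>.mem hx))
      · rw [if_neg hbr]
        have hpush : ¬ (isCloser c = true ∧ st.getLast? = some (pairOf c)) := by
          intro ⟨_, hlast⟩
          apply hbr
          constructor
          · intro hnil; rw [hnil] at hlast; simp at hlast
          · rw [hlast, pairB_get c, if_pos hc]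
        simp only [List.foldl_cons]
        rw [step_push st c hpush]
        obtain ⟨r', hr'⟩ := stack_persist c hc t st []
        rw [show st ++ [c] = st ++ c :: [] from rfl, hr']
        exact (fsc_append_closer st c r' h hc).symm
    · rw [if_neg hc]
      simp only [List.foldl_cons]
      rw [step_push st c (by intro h'; exact hc h'.1)]
      exact ih (st ++ [c]) (by
        intro x hx
        rcases List.mem_append.mp hx with h1 | h1
        · exact h x h1
        · simp at h1; subst h1; simpa using hc)

-- — A's scan —
lemma scanA_eq_fsc : ∀ (cs : List Char) (total : Int), scanA total cs = total + fsc cs := by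
  intro cs
  induction cs with
  | nil => intro total; simp [scanA, fsc]
  | cons c t ih =>
    intro total
    rw [scanA, closeA_get c]
    by_cases hc : isCloser c = true
    · rw [if_pos hc]; simp [fsc, hc]
    · rw [if_neg hc]
      simp only
      rw [ih total]
      simp [fsc, hc]

-- — the while loop preserves the stack fold and ends in a fixpoint —
lemma foldl_step_stepA (s : String) (st : List Char) :
    List.foldl step st (pyStepA s).toList = List.foldl step st s.toList := by
  rw [stepA_toList]
  rw [foldl_step_remPair '<' '>' (by decide) (by decide) (by decide),
      foldl_step_remPair '{' '}' (by decide) (by decide) (by decide),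
      foldl_step_remPair '[' ']' (by decide) (by decide) (by decide),
      foldl_step_remPair '(' ')' (by decide) (by decide) (by decide)]

lemma reduceA_foldl (s : String) :
    List.foldl step [] (reduceA s).toList = List.foldl step [] s.toList := by
  fun_induction reduceA s with
  | case1 s h => rfl
  | case2 s h ih => rw [ih, foldl_step_stepA]

lemma reduceA_fix (s : String) : pyStepA (reduceA s) = reduceA s := by
  fun_induction reduceA s with
  | case1 s h => exact h
  | case2 s h ih => exact ih

lemma reduceA_toList_eq (s : String) :
    (reduceA s).toList = List.foldl step [] s.toList := by
  rw [← reduceA_foldl s]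
  have hfix := reduceA_fix s
  have e := stepA_toList (reduceA s)
  rw [hfix] at e
  set l0 := (reduceA s).toList with hl0
  have h1 : remPair '(' ')' l0 = l0 := by
    have h1l := remPair_length_le '(' ')' l0
    have h2l := remPair_length_le '[' ']' (remPair '(' ')' l0)
    have h3l := remPair_length_le '{' '}' (remPair '[' ']' (remPair '(' ')' l0))
    have h4l := remPair_length_le '<' '>' (remPair '{' '}' (remPair '[' ']' (remPair '(' ')' l0)))
    have : l0.length ≤ (remPair '(' ')' l0).length := by
      conv_lhs => rw [e]
      omega
    exact remPair_eq_of_length _ _ _ (by omega)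
  rw [h1] at e
  have h2 : remPair '[' ']' l0 = l0 := by
    have h2l := remPair_length_le '[' ']' l0
    have h3l := remPair_length_le '{' '}' (remPair '[' ']' l0)
    have h4l := remPair_length_le '<' '>' (remPair '{' '}' (remPair '[' ']' l0))
    have : l0.length ≤ (remPair '[' ']' l0).length := by
      conv_lhs => rw [e]
      omega
    exact remPair_eq_of_length _ _ _ (by omega)
  rw [h2] at e
  have h3 : remPair '{' '}' l0 = l0 := by
    have h3l := remPair_length_le '{' '}' l0
    have h4l := remPair_length_le '<' '>' (remPair '{' '}' l0)
    have : l0.length ≤ (remPair '{' '}' l0).length := by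
      conv_lhs => rw [e]
      omega
    exact remPair_eq_of_length _ _ _ (by omega)
  rw [h3] at e
  symm
  apply red_of_noRedex
  intro o c hm
  simp only [List.mem_cons, List.not_mem_nil, or_false, Prod.mk.injEq] at hm
  rcases hm with ⟨rfl, rfl⟩ | ⟨rfl, rfl⟩ | ⟨rfl, rfl⟩ | ⟨rfl, rfl⟩
  · exact remPair_id_no_occ _ _ _ h1
  · exact remPair_id_no_occ _ _ _ h2
  · exact remPair_id_no_occ _ _ _ h3
  · exact remPair_id_no_occ _ _ _ e.symm

-- — per-line and total equality —
lemma line_eq (line : String) (total : Int) :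
    scanA total (reduceA line).toList = total + lineB [] line.toList := by
  rw [scanA_eq_fsc, reduceA_toList_eq]
  rw [lineB_eq_fsc line.toList [] (by intro x hx; simp at hx)]

-- ===== VERDICT (by name: the statement is the Claim_ definition above) =====
theorem part1_spec : Claim_equal_part1 := by
  intro data _
  unfold Spec_part1 part1 part1_alt
  suffices h : ∀ (acc : Int) (ds : List String),
      List.foldl (fun total line => scanA total (reduceA line).toList) acc ds =
      List.foldl (fun total line => total + lineB [] line.toList) acc ds from h 0 data
  intro acc ds
  induction ds generalizing acc with
  | nil => rfl
  | cons l t ih =>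
    simp only [List.foldl_cons]
    rw [line_eq l acc]
    exact ih _
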